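-- pv_equiv track=rewrite | github.com/deedy5/Codewars_Python | 6kyu/Triple trouble.py | triple_double
-- ===== SOURCE A (Python) =====
-- from collections import Counter
--
-- def triple_double(num1, num2):
--     countnum1 = Counter(f"{num1}").most_common()
--     countnum2 = Counter(f"{num2}")
--     for x in countnum1:
--         if x[1] >= 3:
--             if countnum2[x[0]] == 2:
--                 return 1
--     return 0
-- ===== SOURCE B (Python) =====
-- def triple_double(num1, num2):
--     # sort the digit strings, run-length encode them, then merge the two
--     # sorted run lists with two pointers looking for a common digit with
--     # a run of >=3 in num1 and a run of exactly 2 in num2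
--     def runs(cs):
--         if not cs:
--             return []
--         c = cs[0]
--         n = 1
--         while n < len(cs) and cs[n] == c:
--             n += 1
--         return [(c, n)] + runs(cs[n:])
--
--     r1 = runs(sorted(str(num1)))
--     r2 = runs(sorted(str(num2)))
--     i = j = 0
--     while i < len(r1) and j < len(r2):
--         c1, n1 = r1[i]
--         c2, n2 = r2[j]
--         if c1 < c2:
--             i += 1
--         elif c2 < c1:
--             j += 1
--         elif n1 >= 3 and n2 == 2:
--             return 1
--         else:
--             i += 1
--             j += 1
--     return 0
-- ===== Notes on version B (the rewrite author's own statement) =====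
-- stated objective: alternative
-- what changed: B replaces A's Counter frequency tables with sort + run-length encoding of each digit string and a two-pointer merge of the two sorted run lists to find a digit with a run of >=3 in num1 and exactly 2 in num2.
import Mathlib
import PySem

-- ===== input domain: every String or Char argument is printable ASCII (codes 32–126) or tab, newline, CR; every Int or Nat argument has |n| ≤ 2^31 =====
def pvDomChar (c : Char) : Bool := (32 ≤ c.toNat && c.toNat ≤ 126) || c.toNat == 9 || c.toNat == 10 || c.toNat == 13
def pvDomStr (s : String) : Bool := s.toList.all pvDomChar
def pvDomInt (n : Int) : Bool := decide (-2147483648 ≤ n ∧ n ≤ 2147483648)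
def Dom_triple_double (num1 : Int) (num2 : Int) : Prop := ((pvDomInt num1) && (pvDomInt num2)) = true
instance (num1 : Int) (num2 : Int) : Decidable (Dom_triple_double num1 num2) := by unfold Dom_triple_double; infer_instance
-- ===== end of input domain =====

-- B replaces A's Counter frequency tables with sort + run-length encoding of each digit string
-- and a two-pointer merge of the two sorted run lists; alternative algorithm, same result.

-- ===== PORT A =====
-- A's 'for x in countnum1: …' loop: return 1 on the first qualifying pair, 0 at the end
def tripleDoubleLoop (d2 : PySem.Dict Char Int) : List (Char × Int) → Int
  | [] => 0
  | x :: rest =>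
    if x.2 ≥ 3 then
      if d2.getD x.1 0 == 2 then 1 else tripleDoubleLoop d2 rest
    else tripleDoubleLoop d2 rest

def triple_double (num1 : Int) (num2 : Int) : Int :=
  let countnum1 := PySem.List.sorted (PySem.Dict.counter (PySem.Int.toStr num1).toList).items (fun kv => kv.2) true
  let countnum2 := PySem.Dict.counter (PySem.Int.toStr num2).toList
  tripleDoubleLoop countnum2 countnum1

-- ===== PORT B =====
-- Source B's 'runs': peel the maximal run of the head character, recurse on the rest
def pvRuns : List Char → List (Char × Nat)
  | [] => []
  | c :: rest =>
    (c, 1 + (rest.takeWhile (· == c)).length) :: pvRuns (rest.dropWhile (· == c))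
termination_by cs => cs.length
decreasing_by
  simp only [List.length_cons]
  exact Nat.lt_succ_of_le (List.length_dropWhile_le _ _)

-- Source B's two-pointer 'while i < len(r1) and j < len(r2)' merge over the two run lists
def pvMerge : List (Char × Nat) → List (Char × Nat) → Int
  | [], _ => 0
  | _ :: _, [] => 0
  | (c1, n1) :: t1, (c2, n2) :: t2 =>
    if c1 < c2 then pvMerge t1 ((c2, n2) :: t2)
    else if c2 < c1 then pvMerge ((c1, n1) :: t1) t2
    else if 3 ≤ n1 ∧ n2 = 2 then 1
    else pvMerge t1 t2

def triple_double_alt (num1 : Int) (num2 : Int) : Int :=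
  let r1 := pvRuns (PySem.List.sorted (PySem.Int.toStr num1).toList (fun c => c) false)
  let r2 := pvRuns (PySem.List.sorted (PySem.Int.toStr num2).toList (fun c => c) false)
  pvMerge r1 r2

-- ===== PRECONDITION & SPEC =====
def Spec_triple_double (num1 : Int) (num2 : Int) (out : Int) : Prop := out = triple_double_alt num1 num2
instance (num1 : Int) (num2 : Int) (out : Int) : Decidable (Spec_triple_double num1 num2 out) := by unfold Spec_triple_double; infer_instance

-- ===== CLAIM (what is proved, stated in full; the proofs are below) =====
def Claim_equal_triple_double : Prop := ∀ (num1 : Int) (num2 : Int), Dom_triple_double num1 num2 → Spec_triple_double num1 num2 (triple_double num1 num2)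

-- ===== LEMMAS AND PROOFS =====

-- A's loop returns 1 iff some listed pair has count ≥ 3 and a lookup of exactly 2
theorem tripleDoubleLoop_eq_one_iff (d2 : PySem.Dict Char Int) (l : List (Char × Int)) :
    tripleDoubleLoop d2 l = 1 ↔ ∃ x ∈ l, x.2 ≥ 3 ∧ d2.getD x.1 0 = 2 := by
  induction l with
  | nil => simp [tripleDoubleLoop]
  | cons x rest ih =>
    simp only [tripleDoubleLoop]
    split_ifs with h1 h2
    · simp only [beq_iff_eq] at h2
      constructor
      · intro _; exact ⟨x, List.mem_cons_self, h1, h2⟩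
      · intro _; rfl
    · simp only [beq_iff_eq] at h2
      rw [ih]
      constructor
      · rintro ⟨y, hy, hc⟩; exact ⟨y, List.mem_cons_of_mem _ hy, hc⟩
      · rintro ⟨y, hy, hc3, hc2⟩
        rcases List.mem_cons.1 hy with rfl | hy
        · exact absurd hc2 h2
        · exact ⟨y, hy, hc3, hc2⟩
    · rw [ih]
      constructor
      · rintro ⟨y, hy, hc⟩; exact ⟨y, List.mem_cons_of_mem _ hy, hc⟩
      · rintro ⟨y, hy, hc3, hc2⟩
        rcases List.mem_cons.1 hy with rfl | hy
        · exact absurd hc3 h1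
        · exact ⟨y, hy, hc3, hc2⟩

theorem tripleDoubleLoop_eq_zero_or_one (d2 : PySem.Dict Char Int) (l : List (Char × Int)) :
    tripleDoubleLoop d2 l = 0 ∨ tripleDoubleLoop d2 l = 1 := by
  induction l with
  | nil => left; rfl
  | cons x rest ih =>
    simp only [tripleDoubleLoop]
    split_ifs
    · right; rfl
    · exact ih
    · exact ih

-- A returns 1 exactly when some digit is tripled in num1 and exactly doubled in num2
theorem a_eq_one_iff (num1 num2 : Int) :
    triple_double num1 num2 = 1 ↔
      ∃ c ∈ PySem.Int.toChars num1,
        3 ≤ (PySem.Int.toChars num1).count c ∧ (PySem.Int.toChars num2).count c = 2 := by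
  unfold triple_double
  simp only [PySem.Int.toList_toStr]
  rw [tripleDoubleLoop_eq_one_iff]
  constructor
  · rintro ⟨x, hx, h3, h2⟩
    rw [PySem.List.mem_sorted, PySem.Dict.items_counter] at hx
    rcases List.mem_map.1 hx with ⟨c, hc, rfl⟩
    refine ⟨c, (PySem.Set.mem_ofList _ _).1 hc, ?_, ?_⟩
    · exact_mod_cast (show (3:Int) ≤ (((PySem.Int.toChars num1).count c : Nat) : Int) from h3)
    · rwa [PySem.Dict.getD_counter, show ((2:Int) = ((2:Nat):Int)) from rfl, Int.natCast_inj] at h2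
  · rintro ⟨c, hc, h3, h2⟩
    refine ⟨(c, ((PySem.Int.toChars num1).count c : Int)), ?_, ?_, ?_⟩
    · rw [PySem.List.mem_sorted, PySem.Dict.items_counter]
      exact List.mem_map.2 ⟨c, (PySem.Set.mem_ofList _ _).2 hc, rfl⟩
    · show (3:Int) ≤ (((PySem.Int.toChars num1).count c : Nat) : Int)
      exact_mod_cast h3
    · rw [PySem.Dict.getD_counter]; exact_mod_cast h2

theorem drop_sorted (c : Char) (rest : List Char) (hs : (c :: rest).Pairwise (· ≤ ·)) :
    (rest.dropWhile (· == c)).Pairwise (· ≤ ·) :=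
  (List.Pairwise.sublist (List.dropWhile_sublist _) hs.of_cons)

theorem not_mem_drop (c : Char) (rest : List Char) (hs : (c :: rest).Pairwise (· ≤ ·)) :
    c ∉ rest.dropWhile (· == c) := by
  intro hc
  cases hdw : rest.dropWhile (· == c) with
  | nil => simp [hdw] at hc
  | cons h t =>
    have hhne : (h == c) = false := by
      have := List.head_dropWhile_not (p := (· == c)) (l := rest) (by simp [hdw])
      simpa [hdw] using this
    have hne : h ≠ c := by simpa using hhne
    rw [hdw] at hc
    -- all elements of h :: t are ≥ h; c ≤ h  since c ≤ everything in rest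
    have hmemrest : ∀ x ∈ rest.dropWhile (· == c), c ≤ x := by
      intro x hx
      exact (List.pairwise_cons.1 hs).1 x ((List.dropWhile_sublist _).subset hx)
    have hch : c ≤ h := hmemrest h (by rw [hdw]; exact List.mem_cons_self)
    have hsorted : (h :: t).Pairwise (· ≤ ·) := by
      have := drop_sorted c rest hs; rwa [hdw] at this
    rcases List.mem_cons.1 hc with rfl | hct
    · exact hne rfl
    · have : h ≤ c := (List.pairwise_cons.1 hsorted).1 c hct
      exact hne (le_antisymm this hch)

theorem count_take (c : Char) (rest : List Char) :
    (rest.takeWhile (· == c)).count c = (rest.takeWhile (· == c)).length := by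
  apply List.count_eq_length.2
  intro x hx
  have hbx : (x == c) = true := List.mem_takeWhile_imp (l := rest) (p := (· == c)) hx
  exact (eq_of_beq hbx).symm

theorem pvRuns_mem_iff (cs : List Char) (hs : cs.Pairwise (· ≤ ·)) (c : Char) (n : Nat) :
    (c, n) ∈ pvRuns cs ↔ c ∈ cs ∧ n = cs.count c := by
  induction cs using pvRuns.induct with
  | case1 => simp [pvRuns]
  | case2 d rest ih =>
    have hd := drop_sorted d rest hs
    have hnm := not_mem_drop d rest hs
    have ih := ih hd
    have hsplit : rest = rest.takeWhile (· == d) ++ rest.dropWhile (· == d) :=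
      (List.takeWhile_append_dropWhile).symm
    have htall : ∀ x ∈ rest.takeWhile (· == d), x = d := by
      intro x hx; simpa using List.mem_takeWhile_imp hx
    have hrestd : rest.count d = (rest.takeWhile (· == d)).count d + (rest.dropWhile (· == d)).count d := by
      conv_lhs => rw [hsplit]
      rw [List.count_append]
    have hcount_d : (d :: rest).count d = 1 + (rest.takeWhile (· == d)).length := by
      rw [List.count_cons_self, hrestd, count_take, List.count_eq_zero.2 hnm]
      omega
    rw [pvRuns]
    simp only [List.mem_cons, Prod.mk.injEq]
    constructor
    · rintro (⟨rfl, rfl⟩ | hmem)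
      · exact ⟨Or.inl rfl, hcount_d.symm⟩
      · obtain ⟨hcmem, hcnt⟩ := ih.1 hmem
        have hcd : c ≠ d := fun h => hnm (h ▸ hcmem)
        have hrestc : rest.count c = (rest.takeWhile (· == d)).count c + (rest.dropWhile (· == d)).count c := by
          conv_lhs => rw [hsplit]
          rw [List.count_append]
        refine ⟨Or.inr ((List.dropWhile_sublist _).subset hcmem), ?_⟩
        rw [List.count_cons_of_ne (Ne.symm hcd), hrestc,
            List.count_eq_zero.2 (fun hx => hcd (htall c hx)), hcnt]
        omega
    · rintro ⟨hcmem, rfl⟩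
      by_cases hcd : c = d
      · subst hcd; left; exact ⟨rfl, hcount_d⟩
      · right
        have hcrest : c ∈ rest := by
          rcases hcmem with h | h
          · exact absurd h hcd
          · exact h
        have hcdrop : c ∈ rest.dropWhile (· == d) := by
          rw [hsplit] at hcrest
          rcases List.mem_append.1 hcrest with h | h
          · exact absurd (htall c h) hcd
          · exact h
        have hrestc : rest.count c = (rest.takeWhile (· == d)).count c + (rest.dropWhile (· == d)).count c := by
          conv_lhs => rw [hsplit]
          rw [List.count_append]
        have : ((d :: rest).count c) = (rest.dropWhile (· == d)).count c := by
          rw [List.count_cons_of_ne (Ne.symm hcd), hrestc,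
              List.count_eq_zero.2 (fun hx => hcd (htall c hx))]
          omega
        exact ih.2 ⟨hcdrop, this⟩


theorem pvRuns_keys_sorted (cs : List Char) (hs : cs.Pairwise (· ≤ ·)) :
    (pvRuns cs).Pairwise (fun a b => a.1 < b.1) := by
  induction cs using pvRuns.induct with
  | case1 => simp [pvRuns]
  | case2 d rest ih =>
    have hd := drop_sorted d rest hs
    have hnm := not_mem_drop d rest hs
    rw [pvRuns]
    refine List.pairwise_cons.2 ⟨?_, ih hd⟩
    intro p hp
    have hmem : p.1 ∈ rest.dropWhile (· == d) :=
      ((pvRuns_mem_iff _ hd p.1 p.2).1 (by exact hp)).1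
    have hle : d ≤ p.1 :=
      (List.pairwise_cons.1 hs).1 p.1 ((List.dropWhile_sublist _).subset hmem)
    have hne : d ≠ p.1 := fun h => hnm (h ▸ hmem)
    exact lt_of_le_of_ne hle hne

theorem pvMerge_eq_zero_or_one (r1 r2 : List (Char × Nat)) :
    pvMerge r1 r2 = 0 ∨ pvMerge r1 r2 = 1 := by
  induction r1, r2 using pvMerge.induct with
  | case1 => left; simp [pvMerge]
  | case2 => left; simp [pvMerge]
  | case3 c1 n1 t1 c2 n2 t2 h ih => rw [pvMerge, if_pos h]; exact ih
  | case4 c1 n1 t1 c2 n2 t2 h h' ih => rw [pvMerge, if_neg h, if_pos h']; exact ih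
  | case5 c1 n1 t1 c2 n2 t2 h h' hc => rw [pvMerge, if_neg h, if_neg h', if_pos hc]; right; rfl
  | case6 c1 n1 t1 c2 n2 t2 h h' hc ih => rw [pvMerge, if_neg h, if_neg h', if_neg hc]; exact ih

theorem pvMerge_eq_one_iff (r1 r2 : List (Char × Nat))
    (h1 : r1.Pairwise (fun a b => a.1 < b.1)) (h2 : r2.Pairwise (fun a b => a.1 < b.1)) :
    pvMerge r1 r2 = 1 ↔ ∃ p ∈ r1, ∃ q ∈ r2, p.1 = q.1 ∧ 3 ≤ p.2 ∧ q.2 = 2 := by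
  induction r1, r2 using pvMerge.induct with
  | case1 r2 => simp [pvMerge]
  | case2 => simp [pvMerge]
  | case3 c1 n1 t1 c2 n2 t2 h ih =>
    rw [pvMerge, if_pos h, ih h1.of_cons h2]
    constructor
    · rintro ⟨p, hp, q, hq, hk⟩
      exact ⟨p, List.mem_cons_of_mem _ hp, q, hq, hk⟩
    · rintro ⟨p, hp, q, hq, hk, h3, hq2⟩
      rcases List.mem_cons.1 hp with rfl | hp
      · -- p = (c1,n1): its key c1 < c2 ≤ every key of r2, contradiction with hk
        exfalso
        rcases List.mem_cons.1 hq with rfl | hq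
        · exact absurd hk (by simpa using ne_of_lt h)
        · have : c2 < q.1 := (List.pairwise_cons.1 h2).1 q hq
          have : c1 < q.1 := lt_trans h this
          exact absurd hk (by simpa using ne_of_lt this)
      · exact ⟨p, hp, q, hq, hk, h3, hq2⟩
  | case4 c1 n1 t1 c2 n2 t2 h h' ih =>
    rw [pvMerge, if_neg h, if_pos h', ih h1 h2.of_cons]
    constructor
    · rintro ⟨p, hp, q, hq, hk⟩
      exact ⟨p, hp, q, List.mem_cons_of_mem _ hq, hk⟩
    · rintro ⟨p, hp, q, hq, hk, h3, hq2⟩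
      rcases List.mem_cons.1 hq with rfl | hq
      · exfalso
        rcases List.mem_cons.1 hp with rfl | hp
        · exact absurd hk (by simpa using (ne_of_lt h').symm
          )
        · have : c1 < p.1 := (List.pairwise_cons.1 h1).1 p hp
          have h2lt : c2 < p.1 := lt_trans h' this
          exact absurd hk (by simpa using ne_of_gt h2lt)
      · exact ⟨p, hp, q, hq, hk, h3, hq2⟩
  | case5 c1 n1 t1 c2 n2 t2 h h' hc =>
    rw [pvMerge, if_neg h, if_neg h', if_pos hc]
    have hkeq : c1 = c2 := le_antisymm (not_lt.1 h') (not_lt.1 h)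
    constructor
    · intro _
      exact ⟨(c1, n1), List.mem_cons_self, (c2, n2), List.mem_cons_self, hkeq, hc.1, hc.2⟩
    · intro _; rfl
  | case6 c1 n1 t1 c2 n2 t2 h h' hc ih =>
    rw [pvMerge, if_neg h, if_neg h', if_neg hc, ih h1.of_cons h2.of_cons]
    have hkeq : c1 = c2 := le_antisymm (not_lt.1 h') (not_lt.1 h)
    subst hkeq
    constructor
    · rintro ⟨p, hp, q, hq, hk⟩
      exact ⟨p, List.mem_cons_of_mem _ hp, q, List.mem_cons_of_mem _ hq, hk⟩
    · rintro ⟨p, hp, q, hq, hk, h3, hq2⟩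
      rcases List.mem_cons.1 hp with rfl | hp <;> rcases List.mem_cons.1 hq with rfl | hq
      · exact absurd ⟨h3, hq2⟩ hc
      · exfalso
        have : c1 < q.1 := (List.pairwise_cons.1 h2).1 q hq
        exact absurd hk (by simpa using ne_of_lt this)
      · exfalso
        have : c1 < p.1 := (List.pairwise_cons.1 h1).1 p hp
        exact absurd hk (by simpa using ne_of_gt this)
      · exact ⟨p, hp, q, hq, hk, h3, hq2⟩

theorem b_eq_one_iff (num1 num2 : Int) :
    triple_double_alt num1 num2 = 1 ↔
      ∃ c ∈ PySem.Int.toChars num1,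
        3 ≤ (PySem.Int.toChars num1).count c ∧ (PySem.Int.toChars num2).count c = 2 := by
  unfold triple_double_alt
  simp only [PySem.Int.toList_toStr]
  set s1 := PySem.Int.toChars num1 with hs1
  set s2 := PySem.Int.toChars num2 with hs2
  set t1 := PySem.List.sorted s1 (fun c => c) false with ht1
  set t2 := PySem.List.sorted s2 (fun c => c) false with ht2
  have hp1 : t1.Pairwise (· ≤ ·) := PySem.List.sorted_pairwise s1 (fun c => c)
  have hp2 : t2.Pairwise (· ≤ ·) := PySem.List.sorted_pairwise s2 (fun c => c)
  have hperm1 : t1.Perm s1 := PySem.List.sorted_perm s1 (fun c => c) false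
  have hperm2 : t2.Perm s2 := PySem.List.sorted_perm s2 (fun c => c) false
  rw [pvMerge_eq_one_iff _ _ (pvRuns_keys_sorted t1 hp1) (pvRuns_keys_sorted t2 hp2)]
  constructor
  · rintro ⟨p, hp, q, hq, hk, h3, hq2⟩
    obtain ⟨hpm, hpc⟩ := (pvRuns_mem_iff t1 hp1 p.1 p.2).1 (by exact hp)
    obtain ⟨hqm, hqc⟩ := (pvRuns_mem_iff t2 hp2 q.1 q.2).1 (by exact hq)
    refine ⟨p.1, hperm1.mem_iff.1 hpm, ?_, ?_⟩
    · rw [← hperm1.count_eq, ← hpc]; exact h3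
    · rw [← hperm2.count_eq, hk, ← hqc]; exact hq2
  · rintro ⟨c, hc, h3, h2⟩
    have hmem1 : c ∈ t1 := hperm1.mem_iff.2 hc
    have hmem2 : c ∈ t2 := by
      refine hperm2.mem_iff.2 (List.count_pos_iff.1 ?_)
      omega
    refine ⟨(c, t1.count c), (pvRuns_mem_iff t1 hp1 c _).2 ⟨hmem1, rfl⟩,
            (c, t2.count c), (pvRuns_mem_iff t2 hp2 c _).2 ⟨hmem2, rfl⟩, rfl, ?_, ?_⟩
    · rw [hperm1.count_eq]; exact h3
    · rw [hperm2.count_eq]; exact h2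

theorem b_eq_zero_or_one (num1 num2 : Int) :
    triple_double_alt num1 num2 = 0 ∨ triple_double_alt num1 num2 = 1 := by
  unfold triple_double_alt
  exact pvMerge_eq_zero_or_one _ _

-- ===== VERDICT (by name: the statement is the Claim_ definition above) =====
theorem triple_double_spec : Claim_equal_triple_double := by
  intro num1 num2 _
  unfold Spec_triple_double
  by_cases h : triple_double num1 num2 = 1
  · rw [h, eq_comm, b_eq_one_iff, ← a_eq_one_iff]; exact h
  · rcases tripleDoubleLoop_eq_zero_or_one (PySem.Dict.counter (PySem.Int.toStr num2).toList) _ with h0 | h1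
    · have ha0 : triple_double num1 num2 = 0 := h0
      rw [ha0]
      rcases b_eq_zero_or_one num1 num2 with hb0 | hb1
      · rw [hb0]
      · exfalso; exact h (by rw [a_eq_one_iff, ← b_eq_one_iff]; exact hb1)
    · exact absurd h1 h
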